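-- pv_equiv track=rewrite | github.com/MrBrantCode/unitest_baseline | mut_generate/mist_train_cf/cf_46719/solution.py | find_hex_cluster
-- ===== SOURCE A (Python) =====
-- def find_hex_cluster(hex_list, target_product):
--     """
--     Finds a group of hexadecimal numbers in a series that, when multiplied together, equal a given number.
--
--     Args:
--     hex_list (list): A list of hexadecimal numbers.
--     target_product (int): The target product.
--
--     Returns:
--     list: The group of hexadecimal numbers that multiply to the target product.
--     """
--     def backtrack(start, path, product):
--         if product == target_product:
--             result.append(path)
--             return
--         if product > target_product:
--             return
--         for i in range(start, len(hex_list)):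
--             new_product = product * int(hex_list[i], 16)
--             if new_product <= target_product:
--                 backtrack(i + 1, path + [hex_list[i]], new_product)
--
--     result = []
--     backtrack(0, [], 1)
--     return result
-- ===== SOURCE B (Python) =====
-- def find_hex_cluster(hex_list, target_product):
--     result = []
--     stack = [(0, [], 1)]
--     while stack:
--         start, path, product = stack.pop()
--         if product == target_product:
--             result.append(path)
--             continue
--         if product > target_product:
--             continue
--         children = []
--         for i in range(start, len(hex_list)):
--             new_product = product * int(hex_list[i], 16)
--             if new_product <= target_product:
--                 children.append((i + 1, path + [hex_list[i]], new_product))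
--         stack.extend(reversed(children))
--     return result
-- ===== Notes on version B (the rewrite author's own statement) =====
-- stated objective: alternative
-- what changed: The recursive backtracking is replaced by an iterative DFS with an explicit stack of (start, path, product) frames, children pushed in reverse so they pop in A's left-to-right order.
import Mathlib
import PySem

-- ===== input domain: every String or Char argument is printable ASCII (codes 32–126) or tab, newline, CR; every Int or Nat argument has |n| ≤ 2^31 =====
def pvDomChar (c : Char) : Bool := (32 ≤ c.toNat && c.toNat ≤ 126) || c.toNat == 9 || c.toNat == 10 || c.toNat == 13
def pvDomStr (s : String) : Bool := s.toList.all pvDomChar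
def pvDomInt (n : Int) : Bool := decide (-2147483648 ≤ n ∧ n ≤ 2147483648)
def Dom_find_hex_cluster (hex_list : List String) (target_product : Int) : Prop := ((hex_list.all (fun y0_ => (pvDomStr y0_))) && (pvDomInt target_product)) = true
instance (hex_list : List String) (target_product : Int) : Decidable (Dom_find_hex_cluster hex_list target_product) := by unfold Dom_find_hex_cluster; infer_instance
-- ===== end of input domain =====

-- B replaces A's recursive backtracking by an explicit-stack iterative DFS (same results, same order); objective: alternative decomposition, not speed.

-- ===== PORT A =====
-- A's inner `backtrack(start, path, product)`; the Nat fuel is only a totality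
-- guard (start strictly increases, so depth ≤ len(hex_list)+1 and the 0 case is never hit).
def pvBtA (hex_list : List String) (target_product : Int) : Nat → Int → List String → Int → List (List String)
  | 0, _, _, _ => []
  | fuel+1, start, path, product =>
    if product = target_product then [path]
    else if product > target_product then []
    else
      (PySem.List.pyRange start (hex_list.length) 1).foldl
        (fun res i =>
          let new_product := product * ((PySem.Int.ofStrBase? (PySem.List.pyGetD hex_list i "") 16).getD 0)
          if new_product ≤ target_product then
            res ++ pvBtA hex_list target_product fuel (i+1) (path ++ [PySem.List.pyGetD hex_list i ""]) new_product
          else res)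
        []

def find_hex_cluster (hex_list : List String) (target_product : Int) : List (List String) :=
  pvBtA hex_list target_product (hex_list.length + 1) 0 [] 1

-- ===== PORT B =====
-- the `children` list built by B's inner for-loop for one popped frame
def pvChildren (hex_list : List String) (target_product : Int) (start : Int) (path : List String) (product : Int) : List (Int × List String × Int) :=
  (PySem.List.pyRange start (hex_list.length) 1).filterMap (fun i =>
    let new_product := product * ((PySem.Int.ofStrBase? (PySem.List.pyGetD hex_list i "") 16).getD 0)
    if new_product ≤ target_product then
      some (i+1, path ++ [PySem.List.pyGetD hex_list i ""], new_product)
    else none)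

-- B's `while stack:` loop; head of the list = top of the stack, so
-- `stack.extend(reversed(children))` = `children ++ rest`.  Fuel is a totality guard:
-- the measure Σ 2^(n - start) strictly decreases, so 2^(n+1) steps always suffice.
def pvLoopB (hex_list : List String) (target_product : Int) : Nat → List (Int × List String × Int) → List (List String) → List (List String)
  | 0, _, result => result
  | _+1, [], result => result
  | fuel+1, (start, path, product) :: rest, result =>
    if product = target_product then
      pvLoopB hex_list target_product fuel rest (result ++ [path])
    else if product > target_product then
      pvLoopB hex_list target_product fuel rest result
    else
      pvLoopB hex_list target_product fuel (pvChildren hex_list target_product start path product ++ rest) result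

def find_hex_cluster_alt (hex_list : List String) (target_product : Int) : List (List String) :=
  pvLoopB hex_list target_product (2 ^ (hex_list.length + 1)) [(0, [], 1)] []

-- ===== PRECONDITION & SPEC =====
-- A raises ValueError (int(s,16)) iff target_product > 1 (otherwise it returns before
-- parsing anything) and some element is not a valid base-16 literal; Pre_ excludes exactly that.
def Pre_find_hex_cluster (hex_list : List String) (target_product : Int) : Prop :=
  1 < target_product → hex_list.all (fun s => (PySem.Int.ofStrBase? s 16).isSome) = true
instance (hex_list : List String) (target_product : Int) : Decidable (Pre_find_hex_cluster hex_list target_product) := by unfold Pre_find_hex_cluster; infer_instance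

def pvWitness_find_hex_cluster : List String × Int := (["2", "a", "3"], 30)

def Spec_find_hex_cluster (hex_list : List String) (target_product : Int) (out : List (List String)) : Prop := out = find_hex_cluster_alt hex_list target_product
instance (hex_list : List String) (target_product : Int) (out : List (List String)) : Decidable (Spec_find_hex_cluster hex_list target_product out) := by unfold Spec_find_hex_cluster; infer_instance

-- ===== CLAIM (what is proved, stated in full; the proofs are below) =====
def Claim_equal_find_hex_cluster : Prop := ∀ (hex_list : List String) (target_product : Int), Dom_find_hex_cluster hex_list target_product → Pre_find_hex_cluster hex_list target_product → Spec_find_hex_cluster hex_list target_product (find_hex_cluster hex_list target_product)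

-- ===== LEMMAS AND PROOFS =====

def pvW (n : Nat) (f : Int × List String × Int) : Nat := 2 ^ (n - f.1.toNat)

def pvMeasure (n : Nat) (st : List (Int × List String × Int)) : Nat := (st.map (pvW n)).sum

-- loop shape of A's for-loop: conditional append-accumulation is a flatten of a map
theorem pvFoldAppend {α β : Type} (c : α → Prop) [DecidablePred c] (g : α → List β) :
    ∀ (l : List α) (init : List β),
      l.foldl (fun res i => if c i then res ++ g i else res) init
        = init ++ (l.map (fun i => if c i then g i else [])).flatten := by
  intro l
  induction l with
  | nil => intro init; simp
  | cons a l ih =>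
      intro init
      by_cases h : c a <;> simp [h, ih, List.append_assoc]

-- flatten ∘ map over a filterMap, as a flatten over the original list
theorem pvFlattenFilterMap {α β γ : Type} (g : α → Option β) (h : β → List γ) :
    ∀ (l : List α),
      ((l.filterMap g).map h).flatten = (l.map (fun a => ((g a).map h).getD [])).flatten := by
  intro l
  induction l with
  | nil => simp
  | cons a l ih =>
      cases hg : g a <;> simp [hg, ih]

-- the value of A's backtrack does not depend on the fuel, as long as it covers the depth
theorem pvBtA_fuel_irrel (hl : List String) (tp : Int) :
    ∀ (f1 : Nat), ∀ (f2 : Nat) (start : Int) (path : List String) (product : Int),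
      start ≤ (hl.length : Int) → (hl.length : Int) < start + f1 → (hl.length : Int) < start + f2 →
      pvBtA hl tp f1 start path product = pvBtA hl tp f2 start path product := by
  intro f1
  induction f1 with
  | zero => intro f2 start path product h1 h2 h3; exfalso; omega
  | succ f1 ih =>
      intro f2 start path product h1 h2 h3
      cases f2 with
      | zero => exfalso; omega
      | succ f2 =>
          simp only [pvBtA]
          split_ifs with hp1 hp2
          · rfl
          · rfl
          · apply PySem.List.foldl_congr_mem
            intro acc i hi
            rw [PySem.List.mem_pyRange_one] at hi
            by_cases hc : product * ((PySem.Int.ofStrBase? (PySem.List.pyGetD hl i "") 16).getD 0) ≤ tp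
            · simp only [hc, if_pos]
              rw [ih f2 (i+1) _ _ (by omega) (by omega) (by omega)]
            · simp only [hc, ite_false]

-- every child frame's start stays in [0, n]
theorem pvChildren_start (hl : List String) (tp : Int) (s : Int) (p : List String) (pr : Int)
    (hs : 0 ≤ s) :
    ∀ f ∈ pvChildren hl tp s p pr, 0 ≤ f.1 ∧ f.1 ≤ (hl.length : Int) := by
  intro f hf
  unfold pvChildren at hf
  rw [List.mem_filterMap] at hf
  obtain ⟨i, hi, hfi⟩ := hf
  rw [PySem.List.mem_pyRange_one] at hi
  by_cases hc : pr * ((PySem.Int.ofStrBase? (PySem.List.pyGetD hl i "") 16).getD 0) ≤ tp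
  · simp only [hc, if_pos, Option.some.injEq] at hfi
    rw [← hfi]
    constructor <;> [omega; omega]
  · simp [hc] at hfi

-- the children of one expansion weigh strictly less than the parent frame
theorem pvChildren_weight (hl : List String) (tp : Int) :
    ∀ (k : Nat) (s : Int) (p : List String) (pr : Int), 0 ≤ s → (hl.length : Int) ≤ s + k →
      pvMeasure hl.length (pvChildren hl tp s p pr) + 1 ≤ 2 ^ k := by
  intro k
  induction k with
  | zero =>
      intro s p pr hs hk
      unfold pvChildren
      rw [PySem.List.pyRange_one_eq_nil (by omega)]
      simp [pvMeasure]
  | succ k ih =>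
      intro s p pr hs hk
      by_cases hsn : (hl.length : Int) ≤ s
      · unfold pvChildren
        rw [PySem.List.pyRange_one_eq_nil (by omega)]
        simp [pvMeasure]
        exact Nat.one_le_two_pow
      · have hcons : pvChildren hl tp s p pr
            = (if pr * ((PySem.Int.ofStrBase? (PySem.List.pyGetD hl s "") 16).getD 0) ≤ tp then
                 [((s+1 : Int), p ++ [PySem.List.pyGetD hl s ""],
                   pr * ((PySem.Int.ofStrBase? (PySem.List.pyGetD hl s "") 16).getD 0))]
               else []) ++ pvChildren hl tp (s+1) p pr := by
          unfold pvChildren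
          rw [PySem.List.pyRange_one_cons (by omega)]
          by_cases hc : pr * ((PySem.Int.ofStrBase? (PySem.List.pyGetD hl s "") 16).getD 0) ≤ tp <;>
            simp [hc]
        have hih := ih (s+1) p pr (by omega) (by omega)
        have hw : 2 ^ (hl.length - (s+1).toNat) ≤ 2 ^ k :=
          Nat.pow_le_pow_right (by norm_num) (by omega)
        have hpow : (2:Nat) ^ (k+1) = 2 ^ k + 2 ^ k := by rw [pow_succ]; omega
        rw [hcons]
        by_cases hc : pr * ((PySem.Int.ofStrBase? (PySem.List.pyGetD hl s "") 16).getD 0) ≤ tp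
        · simp only [hc, if_pos]
          simp only [pvMeasure, List.map_append, List.sum_append, List.map_cons, List.map_nil,
            List.sum_cons, List.sum_nil, pvW]
          simp only [pvMeasure] at hih
          omega
        · simp only [hc, ite_false, List.nil_append]
          simp only [pvMeasure] at hih ⊢
          omega

-- evaluating the children frames with A's backtrack gives exactly A's expansion of the parent
theorem pvChildren_eval (hl : List String) (tp : Int) (s : Int) (p : List String) (pr : Int)
    (hs0 : 0 ≤ s) (hpr1 : ¬ pr = tp) (hpr2 : ¬ pr > tp) :
    ((pvChildren hl tp s p pr).map (fun f => pvBtA hl tp (hl.length + 1) f.1 f.2.1 f.2.2)).flatten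
      = pvBtA hl tp (hl.length + 1) s p pr := by
  conv_rhs => rw [pvBtA]
  simp only [hpr1, hpr2, ite_false]
  rw [pvFoldAppend (fun i => pr * ((PySem.Int.ofStrBase? (PySem.List.pyGetD hl i "") 16).getD 0) ≤ tp)
      (fun i => pvBtA hl tp (hl.length) (i+1)
        (p ++ [PySem.List.pyGetD hl i ""])
        (pr * ((PySem.Int.ofStrBase? (PySem.List.pyGetD hl i "") 16).getD 0)))]
  unfold pvChildren
  rw [pvFlattenFilterMap]
  simp only [List.nil_append]
  congr 1
  apply List.map_congr_left
  intro i hi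
  rw [PySem.List.mem_pyRange_one] at hi
  by_cases hc : pr * ((PySem.Int.ofStrBase? (PySem.List.pyGetD hl i "") 16).getD 0) ≤ tp
  · simp only [hc, if_pos, Option.map_some, Option.getD_some]
    exact pvBtA_fuel_irrel hl tp (hl.length + 1) hl.length (i+1) _ _
      (by omega) (by omega) (by omega)
  · simp [hc]

-- the loop invariant: B's stack machine emits, in order, A's backtrack value of every frame
theorem pvLoopB_eval (hl : List String) (tp : Int) :
    ∀ (fuel : Nat) (st : List (Int × List String × Int)) (res : List (List String)),
      (∀ f ∈ st, 0 ≤ f.1 ∧ f.1 ≤ (hl.length : Int)) →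
      pvMeasure hl.length st ≤ fuel →
      pvLoopB hl tp fuel st res
        = res ++ (st.map (fun f => pvBtA hl tp (hl.length + 1) f.1 f.2.1 f.2.2)).flatten := by
  intro fuel
  induction fuel with
  | zero =>
      intro st res hinv hm
      cases st with
      | nil => simp [pvLoopB]
      | cons f rest =>
          exfalso
          have h1 : 1 ≤ pvW hl.length f := Nat.one_le_two_pow
          simp only [pvMeasure, List.map_cons, List.sum_cons] at hm
          omega
  | succ fuel ih =>
      intro st res hinv hm
      cases st with
      | nil => simp [pvLoopB]
      | cons f rest =>
          obtain ⟨s, p, pr⟩ := f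
          have hfr := hinv (s, p, pr) (List.mem_cons_self)
          have hinvr : ∀ f ∈ rest, 0 ≤ f.1 ∧ f.1 ≤ (hl.length : Int) := by
            intro f hf; exact hinv f (List.mem_cons_of_mem _ hf)
          have hw1 : 1 ≤ pvW hl.length (s, p, pr) := Nat.one_le_two_pow
          simp only [pvMeasure, List.map_cons, List.sum_cons] at hm
          have hmr : pvMeasure hl.length rest ≤ fuel := by
            simp only [pvMeasure]; omega
          simp only [pvLoopB]
          split_ifs with h1 h2
          · rw [ih rest (res ++ [p]) hinvr hmr]
            have he : pvBtA hl tp (hl.length + 1) s p pr = [p] := by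
              rw [pvBtA]; simp [h1]
            simp [he]
          · rw [ih rest res hinvr hmr]
            have he : pvBtA hl tp (hl.length + 1) s p pr = [] := by
              rw [pvBtA]; simp [h1, h2]
            simp [he]
          · have hch := pvChildren_weight hl tp (hl.length - s.toNat) s p pr hfr.1 (by omega)
            have hwv : pvW hl.length (s, p, pr) = 2 ^ (hl.length - s.toNat) := rfl
            rw [ih (pvChildren hl tp s p pr ++ rest) res
              (by
                intro f hf
                rcases List.mem_append.mp hf with hf | hf
                · exact pvChildren_start hl tp s p pr hfr.1 f hf
                · exact hinvr f hf)
              (by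
                simp only [pvMeasure, List.map_append, List.sum_append]
                simp only [pvMeasure] at hch
                omega)]
            rw [List.map_append, List.flatten_append,
              pvChildren_eval hl tp s p pr hfr.1 h1 h2]
            simp

-- ===== VERDICT (by name: the statement is the Claim_ definition above) =====
theorem find_hex_cluster_spec : Claim_equal_find_hex_cluster := by
  intro hl tp _ _
  unfold Spec_find_hex_cluster find_hex_cluster find_hex_cluster_alt
  rw [pvLoopB_eval hl tp _ _ _
    (by intro f hf; simp only [List.mem_singleton] at hf; subst hf; simp)
    (by
      simp only [pvMeasure, pvW, List.map_cons, List.map_nil, List.sum_cons, List.sum_nil]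
      have : (2:Nat) ^ (hl.length - (0:Int).toNat) ≤ 2 ^ (hl.length + 1) :=
        Nat.pow_le_pow_right (by norm_num) (by omega)
      omega)]
  simp
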